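-- pv_equiv track=rewrite | github.com/andynet/pheri_preprocessing | 013_create_models.py | create_phage_to_genus_dict
-- ===== SOURCE A (Python) =====
-- def create_phage_to_genus_dict(lines):
--     result = dict()
--     for line in lines:
--         phage_id = line.split()[0]
--         genera = line.split()[1].strip()
--         if phage_id not in result:
--             result[phage_id] = set()
--         result[phage_id].add(genera)
--
--     return result
-- ===== SOURCE B (Python) =====
-- def create_phage_to_genus_dict(lines):
--     keys = dict.fromkeys(line.split()[0] for line in lines)
--     return {key: {line.split()[1].strip() for line in lines
--                   if line.split()[0] == key}
--             for key in keys}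
-- ===== Notes on version B (the rewrite author's own statement) =====
-- stated objective: alternative
-- what changed: Replaces A's single probe-and-insert pass over a dict of sets by a two-phase grouping with no incremental dict: first collect the distinct phage_ids in first-occurrence order (dict.fromkeys), then for each key rescan all lines and build its genus set with a set comprehension.
import Mathlib
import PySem

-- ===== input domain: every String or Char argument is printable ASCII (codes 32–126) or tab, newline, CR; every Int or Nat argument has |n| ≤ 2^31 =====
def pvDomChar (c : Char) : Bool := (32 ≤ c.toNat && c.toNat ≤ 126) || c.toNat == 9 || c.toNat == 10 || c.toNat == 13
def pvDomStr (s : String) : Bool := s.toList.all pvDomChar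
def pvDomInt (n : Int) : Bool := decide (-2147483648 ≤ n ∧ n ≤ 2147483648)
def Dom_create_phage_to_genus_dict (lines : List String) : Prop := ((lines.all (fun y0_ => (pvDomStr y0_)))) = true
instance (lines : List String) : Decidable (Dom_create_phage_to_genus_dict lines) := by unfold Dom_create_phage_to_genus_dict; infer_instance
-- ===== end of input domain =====

-- B replaces A's single probe-and-insert pass over a dict of sets by a two-phase grouping with
-- no incremental dict: collect the distinct phage_ids in first-occurrence order, then for each
-- key rescan all lines and build its genus set (alternative decomposition, O(n*k) vs O(n)).

-- ===== PORT A =====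
-- line.split()[0]  (pyGetD is exact under Pre_: index in range)
def pvKey (line : String) : String := PySem.List.pyGetD (PySem.Str.split₀ line) 0 ""
-- line.split()[1].strip()
def pvGen (line : String) : String :=
  PySem.Str.strip (PySem.List.pyGetD (PySem.Str.split₀ line) 1 "")

def create_phage_to_genus_dict (lines : List String) : List (String × List String) :=
  (lines.foldl
    (fun (result : PySem.Dict String (PySem.Set String)) line =>
      let phage_id := pvKey line
      let genera := pvGen line
      let result := if result.contains phage_id then result else result.insert phage_id PySem.Set.empty
      result.modify phage_id PySem.Set.empty (fun s => PySem.Set.add s genera))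
    PySem.Dict.empty).items

-- ===== PORT B =====
def create_phage_to_genus_dict_alt (lines : List String) : List (String × List String) :=
  let keys := PySem.Set.ofList (lines.map (fun line => pvKey line))   -- dict.fromkeys(...)
  keys.map (fun key =>
    (key,
      -- set comprehension: {line.split()[1].strip() for line in lines if line.split()[0] == key}
      (lines.filter (fun line => pvKey line == key)).foldl
        (fun s line => PySem.Set.add s (pvGen line)) PySem.Set.empty))

-- ===== PRECONDITION & SPEC =====
-- Pre_: every line has at least two whitespace-separated tokens; on any other line A raises IndexError.
def Pre_create_phage_to_genus_dict (lines : List String) : Prop :=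
  ∀ line ∈ lines, 2 ≤ (PySem.Str.split₀ line).length
instance (lines : List String) : Decidable (Pre_create_phage_to_genus_dict lines) := by
  unfold Pre_create_phage_to_genus_dict; infer_instance
def pvWitness_create_phage_to_genus_dict : List String := ["p1 gA", "p2 gB", "p1 gA"]
def Spec_create_phage_to_genus_dict (lines : List String) (out : List (String × List String)) : Prop := out = create_phage_to_genus_dict_alt lines
instance (lines : List String) (out : List (String × List String)) : Decidable (Spec_create_phage_to_genus_dict lines out) := by unfold Spec_create_phage_to_genus_dict; infer_instance

-- ===== CLAIM (what is proved, stated in full; the proofs are below) =====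
def Claim_equal_create_phage_to_genus_dict : Prop := ∀ (lines : List String), Dom_create_phage_to_genus_dict lines → Pre_create_phage_to_genus_dict lines → Spec_create_phage_to_genus_dict lines (create_phage_to_genus_dict lines)

-- ===== LEMMAS AND PROOFS =====

-- A's per-line step, expressed on a precomputed (id, genus) pair.
def pvStepA (d : PySem.Dict String (PySem.Set String)) (p : String × String) :
    PySem.Dict String (PySem.Set String) :=
  (if d.contains p.1 then d else d.insert p.1 PySem.Set.empty).modify p.1 PySem.Set.empty
    (fun s => PySem.Set.add s p.2)

theorem pvKeys_ins (d : PySem.Dict String (PySem.Set String)) (k : String)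
    (v : PySem.Set String) : (d.insert k v).keys = PySem.Set.add d.keys k := by
  by_cases h : d.contains k = true
  · rw [PySem.Dict.keys_insert_of_contains _ _ h,
      PySem.Set.add_of_mem ((PySem.Dict.contains_iff_mem_keys d k).mp h)]
  · rw [PySem.Dict.keys_insert_of_not_contains _ _ (by simpa using h),
      PySem.Set.add_of_not_mem (fun hm => h ((PySem.Dict.contains_iff_mem_keys d k).mpr hm))]

theorem pvKeys_stepA (d : PySem.Dict String (PySem.Set String)) (p : String × String) :
    (pvStepA d p).keys = PySem.Set.add d.keys p.1 := by
  unfold pvStepA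
  by_cases h : d.contains p.1 = true
  · rw [if_pos h, PySem.Dict.keys_modify, pvKeys_ins, PySem.Set.add_of_mem
      ((PySem.Dict.contains_iff_mem_keys d p.1).mp h)]
  · rw [if_neg (by simpa using h), PySem.Dict.keys_modify, pvKeys_ins, pvKeys_ins]
    rw [PySem.Set.add_of_mem (by
      rw [PySem.Set.mem_add]; exact Or.inr rfl)]

theorem pvGetD_stepA (d : PySem.Dict String (PySem.Set String)) (p : String × String)
    (k : String) :
    (pvStepA d p).getD k PySem.Set.empty =
      if p.1 = k then PySem.Set.add (d.getD k PySem.Set.empty) p.2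
      else d.getD k PySem.Set.empty := by
  unfold pvStepA
  by_cases h : d.contains p.1 = true
  · rw [if_pos h, PySem.Dict.getD_modify]
    by_cases hk : p.1 = k
    · subst hk; simp
    · simp [hk, Ne.symm hk]
  · rw [if_neg (by simpa using h), PySem.Dict.getD_modify]
    by_cases hk : p.1 = k
    · subst hk
      rw [PySem.Dict.getD_of_not_contains d PySem.Set.empty (by simpa using h)]
      simp
    · simp [hk, Ne.symm hk, PySem.Dict.getD_insert]

theorem pvFoldGetD (ps : List (String × String)) (d : PySem.Dict String (PySem.Set String))
    (k : String) :
    (ps.foldl pvStepA d).getD k PySem.Set.empty =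
      ps.foldl (fun s p => if p.1 = k then PySem.Set.add s p.2 else s)
        (d.getD k PySem.Set.empty) := by
  induction ps generalizing d with
  | nil => rfl
  | cons p ps ih => simp only [List.foldl_cons, ih, pvGetD_stepA]

theorem pvFoldKeys (ps : List (String × String)) (d : PySem.Dict String (PySem.Set String)) :
    (ps.foldl pvStepA d).keys = PySem.Set.update d.keys (ps.map Prod.fst) := by
  induction ps generalizing d with
  | nil => rfl
  | cons p ps ih =>
    simp only [List.foldl_cons, List.map_cons, PySem.Set.update_cons, ih, pvKeys_stepA]

-- the conditional fold is the fold over the filtered list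
theorem pvFoldFilter (xs : List String) (k : String) (s : PySem.Set String) :
    xs.foldl (fun s l => if pvKey l = k then PySem.Set.add s (pvGen l) else s) s =
      (xs.filter (fun l => pvKey l == k)).foldl
        (fun s l => PySem.Set.add s (pvGen l)) s := by
  induction xs generalizing s with
  | nil => rfl
  | cons x xs ih =>
    by_cases h : pvKey x = k
    · simp [List.foldl_cons, h, ih]
    · simp [List.foldl_cons, h, ih]

-- ===== VERDICT (by name: the statement is the Claim_ definition above) =====
theorem create_phage_to_genus_dict_spec : Claim_equal_create_phage_to_genus_dict := by
  intro lines _ _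
  unfold Spec_create_phage_to_genus_dict create_phage_to_genus_dict create_phage_to_genus_dict_alt
  have hA : lines.foldl
      (fun (result : PySem.Dict String (PySem.Set String)) line =>
        let phage_id := pvKey line
        let genera := pvGen line
        let result := if result.contains phage_id then result else result.insert phage_id PySem.Set.empty
        result.modify phage_id PySem.Set.empty (fun s => PySem.Set.add s genera))
      PySem.Dict.empty
      = (lines.map (fun line => (pvKey line, pvGen line))).foldl pvStepA PySem.Dict.empty := by
    rw [List.foldl_map]; rfl
  rw [hA]
  set ps := lines.map (fun line => (pvKey line, pvGen line)) with hps
  have hk : (ps.foldl pvStepA PySem.Dict.empty).keys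
      = PySem.Set.ofList (lines.map (fun line => pvKey line)) := by
    rw [pvFoldKeys, PySem.Dict.keys_empty, PySem.Set.update_nil_left, hps,
      List.map_map]
    rfl
  rw [PySem.Dict.items_eq_map_keys _ (hk ▸ PySem.Set.nodup_ofList _) PySem.Set.empty, hk]
  refine List.map_congr_left (fun k _ => ?_)
  rw [pvFoldGetD, PySem.Dict.getD_empty, hps, List.foldl_map]
  simpa using pvFoldFilter lines k PySem.Set.empty
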